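-- pv_equiv track=rewrite | github.com/limeng000111/python | excise.py | countThree
-- ===== SOURCE A (Python) =====
-- def countThree(digit):
--     if not isinstance(digit,int):
--         raise TypeError('number is not int')
--     # digit = len(str(number))
--     if(digit <=0):
--         return 0
--     if(digit ==1):
--         return 1
--     return 10*countThree(digit-1) + 10 **(digit-1)
-- ===== SOURCE B (Python) =====
-- def countThree(digit):
--     if not isinstance(digit, int):
--         raise TypeError('number is not int')
--     if digit <= 0:
--         return 0
--     return digit * (10 ** digit // 10)
-- ===== Notes on version B (the rewrite author's own statement) =====
-- stated objective: faster
-- what changed: Replaced A's linear recursion f(n)=ten*f(n-1)+ten^(n-1) with the closed form digit times ten to the power digit-1, computed by one exponentiation and an exact floor division.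
import Mathlib
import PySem

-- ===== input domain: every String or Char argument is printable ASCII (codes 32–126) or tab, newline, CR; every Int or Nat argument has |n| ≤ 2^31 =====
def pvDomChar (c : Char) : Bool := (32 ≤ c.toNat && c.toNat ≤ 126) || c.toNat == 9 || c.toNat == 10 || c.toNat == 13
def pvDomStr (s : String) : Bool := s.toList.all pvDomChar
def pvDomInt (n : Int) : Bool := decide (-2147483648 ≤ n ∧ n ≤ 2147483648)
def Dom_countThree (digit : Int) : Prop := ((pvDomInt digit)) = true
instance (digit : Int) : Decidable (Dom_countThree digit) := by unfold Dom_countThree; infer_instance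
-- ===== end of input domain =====

-- B replaces A's linear recursion by the closed form digit times ten to the power digit-1 (objective: faster; intended as faster — a timing run measured B far faster at every size at which A itself still returns).

-- ===== PORT A =====
-- A's recursion: ten times the previous value plus ten to the power digit-1; base cases zero and one.
-- On the recursive branch digit-1 ≥ 1, so `.toNat` is exact for the exponent.
def countThree (digit : Int) : Int :=
  if digit ≤ 0 then 0
  else if digit = 1 then 1
  else 10 * countThree (digit - 1) + 10 ^ (digit - 1).toNat
termination_by digit.toNat
decreasing_by omega

-- ===== PORT B =====
-- closed form; the Python floor division is ported as PySem floor division (exact here)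
def countThree_alt (digit : Int) : Int :=
  if digit ≤ 0 then 0
  else digit * PySem.Int.floordiv (10 ^ digit.toNat) 10

-- ===== PRECONDITION & SPEC =====
-- A recurses once per unit of digit, so for large positive digit it exceeds Python's
-- recursion limit and raises RecursionError. Pre_ excludes that crash region via a slightly
-- conservative bound (the exact crash point depends on the caller's stack depth); in the
-- thin excluded band where A still returns, B returns the very same value.
def Pre_countThree (digit : Int) : Prop := digit ≤ 950
instance (digit : Int) : Decidable (Pre_countThree digit) := by unfold Pre_countThree; infer_instance
def pvWitness_countThree : Int := (5)
def Spec_countThree (digit : Int) (out : Int) : Prop := out = countThree_alt digit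
instance (digit : Int) (out : Int) : Decidable (Spec_countThree digit out) := by unfold Spec_countThree; infer_instance

-- ===== CLAIM (what is proved, stated in full; the proofs are below) =====
def Claim_equal_countThree : Prop := ∀ (digit : Int), Dom_countThree digit → Pre_countThree digit → Spec_countThree digit (countThree digit)

-- ===== LEMMAS AND PROOFS =====

-- A on n+1 (n : Nat) equals the closed form.
theorem countThree_nat (n : Nat) : countThree ((n : Int) + 1) = ((n : Int) + 1) * 10 ^ n := by
  induction n with
  | zero => simp [countThree]
  | succ m ih =>
    rw [countThree]
    push_cast
    have h0 : ¬ ((m : Int) + 1 + 1 ≤ 0) := by omega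
    have h1 : ((m : Int) + 1 + 1) ≠ 1 := by omega
    rw [if_neg h0, if_neg h1]
    have he : ((m : Int) + 1 + 1 - 1) = (m : Int) + 1 := by ring
    rw [he, ih]
    have ht : ((m : Int) + 1).toNat = m + 1 := by omega
    rw [ht]
    ring

-- ===== VERDICT (by name: the statement is the Claim_ definition above) =====
theorem countThree_spec : Claim_equal_countThree := by
  intro digit _ _
  unfold Spec_countThree countThree_alt
  by_cases h : digit ≤ 0
  · rw [countThree, if_pos h, if_pos h]
  · rw [if_neg h]
    obtain ⟨n, hn⟩ : ∃ n : Nat, digit = (n : Int) + 1 := ⟨(digit - 1).toNat, by omega⟩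
    subst hn
    rw [countThree_nat n]
    have ht : (((n : Int) + 1)).toNat = n + 1 := by omega
    rw [ht]
    have hd : PySem.Int.floordiv ((10 : Int) ^ (n + 1)) 10 = 10 ^ n := by
      rw [pow_succ]
      rw [PySem.Int.floordiv_eq_ediv_of_pos (by norm_num)]
      exact Int.mul_ediv_cancel _ (by norm_num)
    rw [hd]
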